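-- pv_equiv track=rewrite | github.com/Akorex/Algorithms-From-Scratch | Data Structures and Algorithms/Python/old/stack.py | is_matched_html
-- ===== SOURCE A (Python) =====
-- class ArrayStack:
--     """LIFO Stack implementation using a Python list as underlying storage"""
--
--     def __init__(self):
--         """Create an empty stack"""
--         self._data = []
--
--     def __len__(self):
--         """Returns the number of elements in the stack"""
--         return len(self._data)
--
--     def is_empty(self):
--         """Return True if stack is empty"""
--         return len(self._data) == 0
--
--     def push(self, e):
--         """Add an element e to the top of the stack"""
--         self._data.append(e)
--
--     def pop(self):
--         """Removes and returns the element at the top of the stack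
--
--         Raise Empty Error if stack is empty
--         """
--         if self.is_empty():
--             raise Empty('Stack is empty')
--         return self._data.pop()
--
--     def top(self):
--         """Returns but do not remove the element at the top of the stack
--
--         Raises Empty Error if the stack is empty
--         """
--         if self.is_empty():
--             raise Empty('Stack is empty')
--         return self._data[-1]
--
--     def __str__(self):
--         """Returns the string representation of the current stack in memory"""
--         return f"Stack: {self._data}"
--
-- def is_matched_html(raw):
--     """Return True if all HTML tags are properly matched. False otherwise"""
--     s = ArrayStack()
--     j = raw.find('<') # find < if any
--
--     while j != -1:
--         k = raw.find('>', j + 1) # find next >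
--         if k == -1:
--             return False
--         tag = raw[j+1: k]
--         if not tag.startswith('/'): # this is the opening tag
--             s.push(tag)
--         else:
--             if s.is_empty():
--                 return False
--             if tag[1:] != s.pop():
--                 return False
--         j = raw.find('<', k + 1) # find the next < character
--
--     return s.is_empty() # were all opening tags matched?
-- ===== SOURCE B (Python) =====
-- def is_matched_html(raw):
--     """Return True if all HTML tags are properly matched. False otherwise"""
--     # single character-by-character scan with an explicit state machine:
--     # buf is None outside a tag, else the list of characters read inside the tag
--     stack = []
--     buf = None
--     for ch in raw:
--         if buf is None:
--             if ch == '<':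
--                 buf = []
--         elif ch == '>':
--             tag = ''.join(buf)
--             if tag.startswith('/'):
--                 if not stack or stack.pop() != tag[1:]:
--                     return False
--             else:
--                 stack.append(tag)
--             buf = None
--         else:
--             buf.append(ch)
--     return buf is None and not stack
-- ===== Notes on version B (the rewrite author's own statement) =====
-- stated objective: alternative
-- what changed: Replaces A's index-jumping loop that repeatedly calls str.find for the tag delimiters (plus an ArrayStack class) by a single character-by-character state-machine scan that accumulates the current tag in a buffer and matches it against a plain list used as a stack.
import Mathlib
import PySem

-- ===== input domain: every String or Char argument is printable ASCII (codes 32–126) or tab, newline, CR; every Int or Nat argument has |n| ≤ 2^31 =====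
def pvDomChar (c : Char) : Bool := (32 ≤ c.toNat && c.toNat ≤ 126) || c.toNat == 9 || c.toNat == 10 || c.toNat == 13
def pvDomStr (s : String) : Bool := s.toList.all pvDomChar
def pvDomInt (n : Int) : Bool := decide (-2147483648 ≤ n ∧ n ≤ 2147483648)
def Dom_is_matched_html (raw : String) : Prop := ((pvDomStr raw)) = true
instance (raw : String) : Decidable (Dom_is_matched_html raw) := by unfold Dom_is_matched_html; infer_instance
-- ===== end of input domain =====

-- B changes A's find()-driven index loop into a one-pass character state machine; objective: alternative (same cost).
-- ===== PORT A =====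
-- A's loop: j = raw.find('<'); while j != -1: k = raw.find('>', j+1) …; transliterated on the
-- character list: find('<') from the current position = dropWhile (· != '<') of the current suffix
-- (empty suffix ↔ j = -1), the slice raw[j+1:k] = takeWhile (· != '>') of what follows '<', and
-- find('>', j+1) = -1 ↔ that dropWhile is empty. The ArrayStack (push = append, pop = last) is the
-- list `stack` with its top first. tag.startswith('/') / tag[1:] is the match on '/' :: u.
def pvA_loop (s : List Char) (stack : List (List Char)) : Bool :=
  match h : s.dropWhile (· != '<') with
  | [] => stack.isEmpty                      -- j = -1 : return s.is_empty()
  | _ :: rest =>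
    match h2 : rest.dropWhile (· != '>') with
    | [] => false                            -- k = -1 : return False
    | _ :: rem =>
      match rest.takeWhile (· != '>') with   -- tag = raw[j+1:k]
      | '/' :: u =>                          -- closing tag: tag.startswith('/')
        match stack with
        | [] => false                        -- s.is_empty() : return False
        | top :: stk => if u = top then pvA_loop rem stk else false
      | tag => pvA_loop rem (tag :: stack)   -- opening tag: push
termination_by s.length
decreasing_by
  all_goals
    have hs : (s.dropWhile (· != '<')).length ≤ s.length := s.length_dropWhile_le _
    have hr : (rest.dropWhile (· != '>')).length ≤ rest.length := rest.length_dropWhile_le _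
    simp [h] at hs
    simp [h2] at hr
    omega

def is_matched_html (raw : String) : Bool :=
  pvA_loop raw.toList []

-- ===== PORT B =====
-- B's state machine: state = none after an early `return False`, otherwise (buf, stack) where
-- buf = none outside a tag and some cs inside one (cs = chars read so far); stack top first.
def pvB_step (st : Option (Option (List Char) × List (List Char))) (ch : Char) :
    Option (Option (List Char) × List (List Char)) :=
  match st with
  | none => none
  | some (none, stack) =>
    if ch = '<' then some (some [], stack) else some (none, stack)
  | some (some buf, stack) =>
    if ch = '>' then
      match buf with
      | '/' :: u =>                          -- tag.startswith('/'); u = tag[1:]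
        match stack with
        | [] => none
        | top :: stk => if u = top then some (none, stk) else none
      | _ => some (none, buf :: stack)
    else some (some (buf ++ [ch]), stack)

def pvB_finish (st : Option (Option (List Char) × List (List Char))) : Bool :=
  match st with
  | some (none, stack) => stack.isEmpty      -- buf is None and not stack
  | _ => false

def is_matched_html_alt (raw : String) : Bool :=
  pvB_finish (raw.toList.foldl pvB_step (some (none, [])))

-- ===== PRECONDITION & SPEC =====
def Spec_is_matched_html (raw : String) (out : Bool) : Prop := out = is_matched_html_alt raw
instance (raw : String) (out : Bool) : Decidable (Spec_is_matched_html raw out) := by unfold Spec_is_matched_html; infer_instance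

-- ===== CLAIM (what is proved, stated in full; the proofs are below) =====
def Claim_equal_is_matched_html : Prop := ∀ (raw : String), Dom_is_matched_html raw → Spec_is_matched_html raw (is_matched_html raw)

-- ===== LEMMAS AND PROOFS =====
theorem pvB_foldl_none (l : List Char) : l.foldl pvB_step none = none := by
  induction l with
  | nil => rfl
  | cons c t ih => simpa [pvB_step] using ih

theorem pvB_foldl_outside (l : List Char) (stack : List (List Char))
    (h : ∀ c ∈ l, c ≠ '<') :
    l.foldl pvB_step (some (none, stack)) = some (none, stack) := by
  induction l with
  | nil => rfl
  | cons c t ih =>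
    have hc : c ≠ '<' := h c (by simp)
    simp only [List.foldl_cons, pvB_step, if_neg hc]
    exact ih (fun c hm => h c (by simp [hm]))

theorem pvB_foldl_inside (l : List Char) (buf : List Char) (stack : List (List Char))
    (h : ∀ c ∈ l, c ≠ '>') :
    l.foldl pvB_step (some (some buf, stack)) = some (some (buf ++ l), stack) := by
  induction l generalizing buf with
  | nil => simp
  | cons c t ih =>
    have hc : c ≠ '>' := h c (by simp)
    simp only [List.foldl_cons, pvB_step, if_neg hc]
    rw [ih (buf ++ [c]) (fun c hm => h c (by simp [hm]))]
    simp

theorem pvDropWhile_head {p : Char → Bool} {l : List Char} {c : Char} {t : List Char}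
    (h : l.dropWhile p = c :: t) : p c = false := by
  induction l with
  | nil => simp at h
  | cons x xs ih =>
    by_cases hx : p x
    · rw [List.dropWhile_cons_of_pos hx] at h; exact ih h
    · rw [List.dropWhile_cons_of_neg hx] at h
      cases h; simpa using hx

theorem pvA_eq_nil (s : List Char) (stack : List (List Char))
    (h : s.dropWhile (· != '<') = []) : pvA_loop s stack = stack.isEmpty := by
  rw [pvA_loop]
  split
  · rfl
  · next heq => rw [h] at heq; simp at heq

theorem pvA_eq_noclose (s : List Char) (stack : List (List Char)) (c : Char) (rest : List Char)
    (h : s.dropWhile (· != '<') = c :: rest) (h2 : rest.dropWhile (· != '>') = []) :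
    pvA_loop s stack = false := by
  rw [pvA_loop]
  split
  · next heq => rw [h] at heq; simp at heq
  · next head rest' heq =>
    rw [h] at heq
    cases heq
    split
    · rfl
    · next heq2 => rw [h2] at heq2; simp at heq2

theorem pvA_eq_close (s : List Char) (stack : List (List Char)) (c c2 : Char)
    (rest rem : List Char)
    (h : s.dropWhile (· != '<') = c :: rest) (h2 : rest.dropWhile (· != '>') = c2 :: rem) :
    pvA_loop s stack =
      (match rest.takeWhile (· != '>') with
       | '/' :: u =>
         match stack with
         | [] => false
         | top :: stk => if u = top then pvA_loop rem stk else false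
       | tag => pvA_loop rem (tag :: stack)) := by
  rw [pvA_loop]
  split
  · next heq => rw [h] at heq; simp at heq
  · next head rest' heq =>
    rw [h] at heq
    cases heq
    split
    · next heq2 => rw [h2] at heq2; simp at heq2
    · next head2 rem' heq2 =>
      rw [h2] at heq2
      cases heq2
      rfl

theorem pvMain (n : ℕ) : ∀ (s : List Char) (stack : List (List Char)), s.length ≤ n →
    pvA_loop s stack = pvB_finish (s.foldl pvB_step (some (none, stack))) := by
  induction n with
  | zero =>
    intro s stack hn
    have hs : s = [] := by cases s <;> simp_all
    subst hs
    rw [pvA_eq_nil [] stack (by simp)]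
    rfl
  | succ n ih =>
    intro s stack hn
    have hsplit : s.takeWhile (· != '<') ++ s.dropWhile (· != '<') = s :=
      List.takeWhile_append_dropWhile
    have hout : (s.takeWhile (· != '<')).foldl pvB_step (some (none, stack))
        = some (none, stack) := by
      apply pvB_foldl_outside
      intro c hc
      simpa using List.mem_takeWhile_imp hc
    have hfold1 : s.foldl pvB_step (some (none, stack))
        = (s.dropWhile (· != '<')).foldl pvB_step (some (none, stack)) := by
      conv_lhs => rw [← hsplit, List.foldl_append, hout]
    rw [hfold1]
    cases hd : s.dropWhile (· != '<') with
    | nil => rw [pvA_eq_nil s stack hd]; rfl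
    | cons c rest =>
      have hc : c = '<' := by have := pvDropWhile_head hd; simpa using this
      subst hc
      rw [List.foldl_cons, show pvB_step (some (none, stack)) '<' = some (some [], stack)
        from by simp [pvB_step]]
      have hsplit2 : rest.takeWhile (· != '>') ++ rest.dropWhile (· != '>') = rest :=
        List.takeWhile_append_dropWhile
      have hin : (rest.takeWhile (· != '>')).foldl pvB_step (some (some [], stack))
          = some (some (rest.takeWhile (· != '>')), stack) := by
        have := pvB_foldl_inside (rest.takeWhile (· != '>')) [] stack
          (fun c hc => by simpa using List.mem_takeWhile_imp hc)
        simpa using this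
      have hfold2 : rest.foldl pvB_step (some (some [], stack))
          = (rest.dropWhile (· != '>')).foldl pvB_step
              (some (some (rest.takeWhile (· != '>')), stack)) := by
        conv_lhs => rw [← hsplit2, List.foldl_append, hin]
      rw [hfold2]
      cases hd2 : rest.dropWhile (· != '>') with
      | nil => rw [pvA_eq_noclose s stack '<' rest hd hd2]; rfl
      | cons c2 rem =>
        have hc2 : c2 = '>' := by have := pvDropWhile_head hd2; simpa using this
        subst hc2
        have hrem : rem.length ≤ n := by
          have h1 : (s.dropWhile (· != '<')).length ≤ s.length := s.length_dropWhile_le _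
          have h2 : (rest.dropWhile (· != '>')).length ≤ rest.length := rest.length_dropWhile_le _
          rw [hd] at h1
          rw [hd2] at h2
          simp only [List.length_cons] at h1 h2
          omega
        rw [pvA_eq_close s stack '<' '>' rest rem hd hd2, List.foldl_cons]
        cases htag : rest.takeWhile (· != '>') with
        | nil =>
          rw [show pvB_step (some (some [], stack)) '>' = some (none, ([] : List Char) :: stack)
            from by simp [pvB_step]]
          exact ih rem ([] :: stack) hrem
        | cons tc tu =>
          by_cases hslash : tc = '/'
          · subst hslash
            cases stack with
            | nil =>
              rw [show pvB_step (some (some ('/' :: tu), [])) '>' = none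
                from by simp [pvB_step]]
              rw [pvB_foldl_none]
              rfl
            | cons top stk =>
              by_cases he : tu = top
              · subst he
                rw [show pvB_step (some (some ('/' :: tu), tu :: stk)) '>' = some (none, stk)
                  from by simp [pvB_step]]
                simpa using ih rem stk hrem
              · rw [show pvB_step (some (some ('/' :: tu), top :: stk)) '>' = none
                  from by simp [pvB_step, he]]
                rw [pvB_foldl_none]
                simp [he, pvB_finish]
          · have hB : pvB_step (some (some (tc :: tu), stack)) '>'
                = some (none, (tc :: tu) :: stack) := by
              simp only [pvB_step]
              rw [if_pos trivial]
              split
              · next heq =>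
                injection heq with h1 h2
                exact absurd h1 hslash
              · rfl
            rw [hB]
            split
            · next heq =>
              injection heq with h1 h2
              exact absurd h1 hslash
            · exact ih rem ((tc :: tu) :: stack) hrem

-- ===== VERDICT (by name: the statement is the Claim_ definition above) =====
theorem is_matched_html_spec : Claim_equal_is_matched_html := by
  intro raw _
  unfold Spec_is_matched_html is_matched_html is_matched_html_alt
  exact pvMain raw.toList.length raw.toList [] le_rfl
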